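-- pv_equiv track=rewrite | github.com/RusieckiRoland/LocalAI-RAG | tools/generate_retrieval_corpora_bundles.py | _build_cs_dependencies
-- ===== SOURCE A (Python) =====
-- from typing import Dict, List, Optional, Tuple
--
-- def _build_cs_dependencies(count: int) -> Dict[str, List[str]]:
--     deps: Dict[str, List[str]] = {}
--     for i in range(1, count + 1):
--         src = f"C{i:04d}"
--         if i < count:
--             deps[src] = [f"C{i+1:04d}"]
--         else:
--             deps[src] = []
--     return deps
-- ===== SOURCE B (Python) =====
-- def _build_cs_dependencies(count: int) -> dict:
--     # Walk the chain back-to-front, carrying each node's successor entry,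
--     # then reverse the collected items and turn them into a dict.
--     items = []
--     succ = []
--     for i in range(count, 0, -1):
--         label = f"C{i:04d}"
--         items.append((label, succ))
--         succ = [label]
--     items.reverse()
--     return dict(items)
-- ===== Notes on version B (the rewrite author's own statement) =====
-- stated objective: alternative
-- what changed: B walks the chain back-to-front carrying each node's successor list (so no i<count guard and no second f-string per node), collects the pairs, reverses them, and builds the dict from the pair list, instead of A's ascending loop that formats both endpoints and branches on the index.
import Mathlib
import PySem

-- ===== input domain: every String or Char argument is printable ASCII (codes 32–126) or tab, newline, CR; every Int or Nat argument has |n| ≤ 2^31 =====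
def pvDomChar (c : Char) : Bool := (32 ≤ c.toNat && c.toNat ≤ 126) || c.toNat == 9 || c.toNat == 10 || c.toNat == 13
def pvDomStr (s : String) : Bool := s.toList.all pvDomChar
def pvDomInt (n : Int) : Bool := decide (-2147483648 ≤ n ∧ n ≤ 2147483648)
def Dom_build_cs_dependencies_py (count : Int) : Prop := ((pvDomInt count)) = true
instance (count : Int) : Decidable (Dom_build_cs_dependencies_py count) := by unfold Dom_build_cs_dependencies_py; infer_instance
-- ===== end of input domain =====

-- B walks the chain back-to-front carrying each node's successor entry, reverses the collected
-- pairs and builds the dict from that list (alternative decomposition, same O(n) cost).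

-- ===== PORT A =====
-- f"C{i:04d}": 'C' followed by str(i) zero-padded to width 4 (exact for the nonnegative i used here)
def pvLabel (i : Int) : String :=
  String.ofList ('C' :: PySem.Chars.zfill (PySem.Int.toChars i) 4)

def build_cs_dependencies_py (count : Int) : List (String × List String) :=
  ((PySem.List.pyRange 1 (count + 1)).foldl
    (fun (deps : PySem.Dict String (List String)) i =>
      let src := pvLabel i
      if i < count then deps.insert src [pvLabel (i + 1)]
      else deps.insert src [])
    PySem.Dict.empty).items

-- ===== PORT B =====
def build_cs_dependencies_py_alt (count : Int) : List (String × List String) :=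
  let st := (PySem.List.pyRange count 0 (-1)).foldl
    (fun (st : List (String × List String) × List String) i =>
      let label := pvLabel i
      (st.1 ++ [(label, st.2)], [label]))
    ([], [])
  (PySem.Dict.ofList st.1.reverse).items

-- ===== PRECONDITION & SPEC =====
def Spec_build_cs_dependencies_py (count : Int) (out : List (String × List String)) : Prop := out = build_cs_dependencies_py_alt count
instance (count : Int) (out : List (String × List String)) : Decidable (Spec_build_cs_dependencies_py count out) := by unfold Spec_build_cs_dependencies_py; infer_instance

-- ===== CLAIM (what is proved, stated in full; the proofs are below) =====
def Claim_equal_build_cs_dependencies_py : Prop := ∀ (count : Int), Dom_build_cs_dependencies_py count → Spec_build_cs_dependencies_py count (build_cs_dependencies_py count)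

-- ===== LEMMAS AND PROOFS =====

-- decoder of a decimal digit string (used only to prove pvLabel injective)
def pvStep (a : Nat) (c : Char) : Nat := a * 10 + (c.toNat - 48)

theorem pvDigitChar_facts (d : Nat) (h : d < 10) :
    (Nat.digitChar d).toNat = 48 + d ∧ Nat.digitChar d ≠ '+' ∧ Nat.digitChar d ≠ '-' := by
  interval_cases d <;> exact ⟨rfl, by decide, by decide⟩

theorem pvToDigitsCore_spec : ∀ (fuel n : Nat) (rest : List Char), n < fuel →
    ∃ ds : List Char, Nat.toDigitsCore 10 fuel n rest = ds ++ rest ∧ ds ≠ [] ∧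
      (∀ c ∈ ds, c ≠ '+' ∧ c ≠ '-') ∧
      (∀ a : Nat, List.foldl pvStep a ds = a * 10 ^ ds.length + n) ∧ n < 10 ^ ds.length := by
  intro fuel
  induction fuel with
  | zero => omega
  | succ f ih =>
    intro n rest hn
    have hd := pvDigitChar_facts (n % 10) (Nat.mod_lt _ (by norm_num))
    by_cases h0 : n / 10 = 0
    · refine ⟨[Nat.digitChar (n % 10)], ?_, by simp, ?_, ?_, ?_⟩
      · simp [Nat.toDigitsCore, h0]
      · intro c hc; simp at hc; subst hc; exact ⟨hd.2.1, hd.2.2⟩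
      · intro a; simp [pvStep, hd.1]; omega
      · simp; omega
    · have hlt : n / 10 < f := by omega
      obtain ⟨ds, heq, hne, hch, hfold, hbound⟩ := ih (n / 10) (Nat.digitChar (n % 10) :: rest) hlt
      refine ⟨ds ++ [Nat.digitChar (n % 10)], ?_, by simp, ?_, ?_, ?_⟩
      · rw [Nat.toDigitsCore]
        simp only [h0, if_false]
        rw [heq]; simp
      · intro c hc
        rcases List.mem_append.1 hc with h | h
        · exact hch c h
        · simp at h; subst h; exact ⟨hd.2.1, hd.2.2⟩
      · intro a
        rw [List.foldl_append, hfold a]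
        simp [pvStep, hd.1, List.length_append, pow_succ]
        have := Nat.div_add_mod n 10
        ring_nf
        omega
      · rw [List.length_append]
        simp [pow_succ]
        have := Nat.div_add_mod n 10
        omega

theorem pvFoldl_replicate_zero (k : Nat) :
    List.foldl pvStep 0 (List.replicate k '0') = 0 := by
  induction k with
  | zero => rfl
  | succ n ih => simpa [List.replicate_succ, pvStep] using ih

theorem pvDec_zfill (i : Int) (h : 0 ≤ i) :
    List.foldl pvStep 0 (PySem.Chars.zfill (PySem.Int.toChars i) 4) = i.toNat := by
  have htc : PySem.Int.toChars i = Nat.toDigits 10 i.toNat := by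
    simp [PySem.Int.toChars, not_lt.2 h]
  obtain ⟨ds, heq, hne, hch, hfold, _⟩ :=
    pvToDigitsCore_spec (i.toNat + 1) i.toNat [] (by omega)
  have hds : PySem.Int.toChars i = ds := by
    rw [htc, Nat.toDigits, heq, List.append_nil]
  rw [hds]
  by_cases h4 : (4 : Int) ≤ ds.length
  · rw [PySem.Chars.zfill.eq_def, if_pos h4, hfold 0]; simp
  · obtain ⟨c, restd, rfl⟩ := List.exists_cons_of_ne_nil hne
    have hc : ¬ (c = '+' ∨ c = '-') := by
      have := hch c (by simp)
      tauto
    rw [PySem.Chars.zfill.eq_def, if_neg h4]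
    simp only [hc, if_false]
    rw [List.foldl_append, pvFoldl_replicate_zero, hfold 0]
    simp

theorem pvLabel_inj {i j : Int} (hi : 0 ≤ i) (hj : 0 ≤ j) (h : pvLabel i = pvLabel j) : i = j := by
  have h' := congrArg String.toList h
  simp only [pvLabel, String.toList_ofList, List.cons.injEq, true_and] at h'
  have := congrArg (List.foldl pvStep 0) h'
  rw [pvDec_zfill i hi, pvDec_zfill j hj] at this
  omega

theorem pvNodup_map_label (a b : Int) (ha : 0 ≤ a) :
    ((PySem.List.pyRange a b).map pvLabel).Nodup := by
  refine List.Nodup.map_on ?_ (PySem.List.nodup_pyRange_one a b)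
  intro x hx y hy hxy
  rw [PySem.List.mem_pyRange_one] at hx hy
  exact pvLabel_inj (by omega) (by omega) hxy

theorem pvA_items (count : Int) (h : 1 ≤ count) :
    build_cs_dependencies_py count
      = (PySem.List.pyRange 1 count).map (fun i => (pvLabel i, [pvLabel (i + 1)]))
        ++ [(pvLabel count, [])] := by
  have hfun : (fun (deps : PySem.Dict String (List String)) (i : Int) =>
      let src := pvLabel i
      if i < count then deps.insert src [pvLabel (i + 1)] else deps.insert src [])
    = (fun (deps : PySem.Dict String (List String)) (i : Int) =>
        deps.insert (pvLabel i) (if i < count then [pvLabel (i + 1)] else [])) := by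
    funext d i
    by_cases hi : i < count <;> simp [hi]
  unfold build_cs_dependencies_py
  rw [hfun,
    PySem.Dict.items_foldl_insert_fresh _ pvLabel _ _
      (fun a _ => PySem.Dict.contains_empty _) (pvNodup_map_label 1 (count + 1) (by omega)),
    show (PySem.Dict.empty : PySem.Dict String (List String)).items = [] from rfl,
    List.nil_append,
    PySem.List.pyRange_one_succ_right h, List.map_append]
  congr 1
  · refine List.map_congr_left ?_
    intro i hi
    rw [PySem.List.mem_pyRange_one] at hi
    simp [show i < count from hi.2]
  · simp

-- the descending accumulation of B, after its first step: successor carried = label of a + 1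
theorem pvB_fold : ∀ (n : Nat) (a : Int), a.toNat = n → 0 ≤ a →
    ∀ (its : List (String × List String)),
    (PySem.List.pyRange a 0 (-1)).foldl
      (fun (st : List (String × List String) × List String) i =>
        (st.1 ++ [(pvLabel i, st.2)], [pvLabel i]))
      (its, [pvLabel (a + 1)])
    = (its ++ (PySem.List.pyRange a 0 (-1)).map (fun i => (pvLabel i, [pvLabel (i + 1)])),
       [pvLabel 1]) := by
  intro n
  induction n with
  | zero =>
    intro a hn ha its
    have h0 : a = 0 := by omega
    subst h0
    rw [PySem.List.pyRange_neg_one_eq_nil le_rfl]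
    simp
  | succ m ih =>
    intro a hn ha its
    have hpos : (0 : Int) < a := by omega
    rw [PySem.List.pyRange_neg_one_cons hpos]
    simp only [List.foldl_cons, List.map_cons]
    have := ih (a - 1) (by omega) (by omega) (its ++ [(pvLabel a, [pvLabel (a + 1)])])
    rw [show a - 1 + 1 = a from by ring] at this
    rw [this, List.append_assoc]
    rfl

theorem pvB_items (count : Int) (h : 1 ≤ count) :
    build_cs_dependencies_py_alt count
      = (PySem.List.pyRange 1 count).map (fun i => (pvLabel i, [pvLabel (i + 1)]))
        ++ [(pvLabel count, [])] := by
  unfold build_cs_dependencies_py_alt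
  rw [PySem.List.pyRange_neg_one_cons (by omega : (0:Int) < count)]
  simp only [List.foldl_cons, List.nil_append]
  have hfold := pvB_fold (count - 1).toNat (count - 1) rfl (by omega)
      [(pvLabel count, [])]
  rw [show count - 1 + 1 = count from by ring] at hfold
  rw [hfold]
  have hrev : PySem.List.pyRange (count - 1) 0 (-1)
      = (PySem.List.pyRange 1 count 1).reverse := by
    have := PySem.List.pyRange_neg_one_eq_reverse (count - 1) 0
    simpa using this
  have hlist : ((pvLabel count, ([] : List String))
        :: (PySem.List.pyRange (count - 1) 0 (-1)).map
          (fun i => (pvLabel i, [pvLabel (i + 1)]))).reverse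
      = (PySem.List.pyRange 1 count).map (fun i => (pvLabel i, [pvLabel (i + 1)]))
        ++ [(pvLabel count, [])] := by
    rw [hrev, List.reverse_cons, ← List.map_reverse, List.reverse_reverse]
  simp only [List.singleton_append]
  rw [hlist]
  have hkeys : (((PySem.List.pyRange 1 count).map
        (fun i => (pvLabel i, [pvLabel (i + 1)]))
        ++ [(pvLabel count, ([] : List String))]).map Prod.fst).Nodup := by
    have heq : (((PySem.List.pyRange 1 count).map
          (fun i => (pvLabel i, [pvLabel (i + 1)]))
          ++ [(pvLabel count, ([] : List String))]).map Prod.fst)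
        = (PySem.List.pyRange 1 (count + 1)).map pvLabel := by
      rw [PySem.List.pyRange_one_succ_right h]
      simp
    rw [heq]
    exact pvNodup_map_label 1 (count + 1) (by omega)
  rw [show (PySem.Dict.ofList ((PySem.List.pyRange 1 count).map
        (fun i => (pvLabel i, [pvLabel (i + 1)])) ++ [(pvLabel count, ([] : List String))]))
      = (((PySem.List.pyRange 1 count).map (fun i => (pvLabel i, [pvLabel (i + 1)]))
        ++ [(pvLabel count, ([] : List String))]).foldl
          (fun d p => d.insert p.1 p.2) PySem.Dict.empty) from rfl,
    PySem.Dict.items_foldl_insert_fresh _ Prod.fst Prod.snd _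
      (fun a _ => PySem.Dict.contains_empty _) hkeys]
  rw [show (PySem.Dict.empty : PySem.Dict String (List String)).items = [] from rfl,
    List.nil_append]
  rw [show (fun (a : String × List String) => (a.1, a.2)) = id from funext fun a => rfl,
    List.map_id]

-- ===== VERDICT (by name: the statement is the Claim_ definition above) =====
theorem build_cs_dependencies_py_spec : Claim_equal_build_cs_dependencies_py := by
  intro count _
  unfold Spec_build_cs_dependencies_py
  by_cases h : 1 ≤ count
  · rw [pvA_items count h, pvB_items count h]
  · have hnilA : PySem.List.pyRange 1 (count + 1) = [] :=
      PySem.List.pyRange_one_eq_nil (by omega)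
    have hnilB : PySem.List.pyRange count 0 (-1) = [] :=
      PySem.List.pyRange_neg_one_eq_nil (by omega)
    simp [build_cs_dependencies_py, build_cs_dependencies_py_alt, hnilA, hnilB]
    rfl
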